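-- pv_equiv track=rewrite | github.com/Ren-97/CodePath2025Summer | Unit2/section2_advanced1.py | is_authentic_collection
-- ===== SOURCE A (Python) =====
-- import collections
--
-- def is_authentic_collection(art_pieces):
--     n = len(art_pieces) - 1
--     count = collections.Counter(art_pieces)
--     if len(set(count.keys())) != n:
--         return False
--
--     for i in range(1,n):
--         if count[i] != 1:
--             return False
--     if count[n] != 2:
--         return False
--     return True
-- ===== SOURCE B (Python) =====
-- def is_authentic_collection(art_pieces):
--     n = len(art_pieces) - 1
--     if n < 1:
--         return False
--     return sorted(art_pieces) == list(range(1, n)) + [n, n]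
-- ===== Notes on version B (the rewrite author's own statement) =====
-- stated objective: simpler
-- what changed: Replaces the Counter, the distinct-key count check and the per-value validation loop with a single sort-then-compare against the canonical expected list [1..n-1, n, n].
import Mathlib
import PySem

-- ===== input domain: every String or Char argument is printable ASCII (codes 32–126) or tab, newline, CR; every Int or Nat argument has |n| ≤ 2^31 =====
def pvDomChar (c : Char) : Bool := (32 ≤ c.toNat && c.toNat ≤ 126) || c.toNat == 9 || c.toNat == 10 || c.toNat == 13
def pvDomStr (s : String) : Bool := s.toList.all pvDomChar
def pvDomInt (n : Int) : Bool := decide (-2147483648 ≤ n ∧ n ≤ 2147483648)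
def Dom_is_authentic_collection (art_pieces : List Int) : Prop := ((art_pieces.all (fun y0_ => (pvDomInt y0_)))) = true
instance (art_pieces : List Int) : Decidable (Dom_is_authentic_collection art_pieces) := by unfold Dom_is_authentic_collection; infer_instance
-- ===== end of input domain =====

-- B replaces the Counter and the validation loop by one sort-then-compare against the canonical list [1..n-1, n, n] (objective: simpler).

-- ===== PORT A =====
def is_authentic_collection (art_pieces : List Int) : Bool :=
  let n : Int := (art_pieces.length : Int) - 1
  let count := PySem.Dict.counter art_pieces
  if ((PySem.Set.ofList count.keys).length : Int) ≠ n then false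
  else if (PySem.List.pyRange 1 n 1).any (fun i => decide (count.getD i 0 ≠ 1)) then false
  else if count.getD n 0 ≠ 2 then false
  else true

-- ===== PORT B =====
def is_authentic_collection_alt (art_pieces : List Int) : Bool :=
  let n : Int := (art_pieces.length : Int) - 1
  if n < 1 then false
  else PySem.List.sorted art_pieces (fun x => x) false == PySem.List.pyRange 1 n 1 ++ [n, n]

-- ===== PRECONDITION & SPEC =====
def Spec_is_authentic_collection (art_pieces : List Int) (out : Bool) : Prop := out = is_authentic_collection_alt art_pieces
instance (art_pieces : List Int) (out : Bool) : Decidable (Spec_is_authentic_collection art_pieces out) := by unfold Spec_is_authentic_collection; infer_instance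

-- ===== CLAIM (what is proved, stated in full; the proofs are below) =====
def Claim_equal_is_authentic_collection : Prop := ∀ (art_pieces : List Int), Dom_is_authentic_collection art_pieces → Spec_is_authentic_collection art_pieces (is_authentic_collection art_pieces)

-- ===== LEMMAS AND PROOFS =====

-- count of a value in the canonical target list [1..n-1, n, n]
lemma count_target (n a : Int) :
    List.count a (PySem.List.pyRange 1 n 1 ++ [n, n]) =
      (if 1 ≤ a ∧ a < n then 1 else 0) + (if a = n then 2 else 0) := by
  rw [List.count_append]
  have h1 : List.count a (PySem.List.pyRange 1 n 1) = if 1 ≤ a ∧ a < n then 1 else 0 := by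
    split_ifs with h
    · exact List.count_eq_one_of_mem (PySem.List.nodup_pyRange_one 1 n)
        (PySem.List.mem_pyRange_one.mpr h)
    · exact List.count_eq_zero_of_not_mem (fun hm => h (PySem.List.mem_pyRange_one.mp hm))
  have h2 : List.count a [n, n] = if a = n then 2 else 0 := by
    by_cases h : a = n
    · subst h; simp
    · simp [h, Ne.symm h]
  rw [h1, h2]

-- membership in the canonical target list
lemma mem_target (n a : Int) (hn : 1 ≤ n) :
    a ∈ PySem.List.pyRange 1 n 1 ++ [n, n] ↔ 1 ≤ a ∧ a ≤ n := by
  simp [List.mem_append, PySem.List.mem_pyRange_one]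
  omega

-- B = true iff the list sorts to the canonical target
lemma alt_true_iff (xs : List Int) :
    is_authentic_collection_alt xs = true ↔
      1 ≤ ((xs.length : Int) - 1) ∧
        PySem.List.sorted xs (fun x => x) false =
          PySem.List.pyRange 1 ((xs.length : Int) - 1) 1 ++ [(xs.length : Int) - 1, (xs.length : Int) - 1] := by
  have hdef : is_authentic_collection_alt xs =
      (if ((xs.length : Int) - 1) < 1 then false
       else ((PySem.List.sorted xs (fun x => x) false) ==
         PySem.List.pyRange 1 ((xs.length : Int) - 1) 1
           ++ [(xs.length : Int) - 1, (xs.length : Int) - 1])) := rfl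
  rw [hdef]
  split_ifs with h
  · simp only [false_iff]
    rintro ⟨h1, -⟩; omega
  · constructor
    · intro hs; exact ⟨by omega, by simpa using hs⟩
    · rintro ⟨-, hs⟩; simpa using hs

-- A = true iff Counter-style conditions hold
lemma a_true_iff_counts (xs : List Int) :
    is_authentic_collection xs = true ↔
      (((PySem.Set.ofList xs).length : Int) = (xs.length : Int) - 1 ∧
        (∀ i : Int, 1 ≤ i → i < (xs.length : Int) - 1 → List.count i xs = 1) ∧
        List.count ((xs.length : Int) - 1) xs = 2) := by
  unfold is_authentic_collection
  simp only [PySem.Dict.keys_counter, PySem.Dict.getD_counter,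
    PySem.Set.ofList_eq_self_of_nodup _ (PySem.Set.nodup_ofList xs)]
  split_ifs with h1 h2 h3
  · simp only [false_iff]
    rintro ⟨he, -⟩; exact h1 he
  · simp only [List.any_eq_true, decide_eq_true_eq, PySem.List.mem_pyRange_one] at h2
    simp only [false_iff]
    rintro ⟨-, hall, -⟩
    obtain ⟨i, ⟨hi1, hi2⟩, hne⟩ := h2
    exact hne (by exact_mod_cast hall i hi1 hi2)
  · simp only [false_iff]
    rintro ⟨-, -, hc⟩
    exact h3 (by exact_mod_cast hc)
  · simp only [List.any_eq_true, decide_eq_true_eq, PySem.List.mem_pyRange_one] at h2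
    push Not at h1 h2 h3
    simp only [true_iff]
    refine ⟨h1, fun i hi1 hi2 => ?_, by exact_mod_cast h3⟩
    have := h2 i ⟨hi1, hi2⟩
    exact_mod_cast this

-- A = true iff the list sorts to the canonical target
lemma a_true_iff (xs : List Int) :
    is_authentic_collection xs = true ↔
      1 ≤ ((xs.length : Int) - 1) ∧
        PySem.List.sorted xs (fun x => x) false =
          PySem.List.pyRange 1 ((xs.length : Int) - 1) 1 ++ [(xs.length : Int) - 1, (xs.length : Int) - 1] := by
  rw [a_true_iff_counts]
  constructor
  · rintro ⟨hlen, hloop, hcn⟩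
    have hn1 : 1 ≤ (xs.length : Int) - 1 := by
      have := @List.count_le_length Int _ ((xs.length : Int) - 1) xs
      omega
    -- the n distinct values of xs are exactly 1..n
    have hsub : PySem.List.pyRange 1 ((xs.length : Int) - 1 + 1) 1 ⊆ PySem.Set.ofList xs := by
      intro a ha
      obtain ⟨ha1, ha2⟩ := PySem.List.mem_pyRange_one.mp ha
      rw [PySem.Set.mem_ofList]
      rcases lt_or_eq_of_le (by omega : a ≤ (xs.length : Int) - 1) with hlt | heq
      · exact List.count_pos_iff.mp (by rw [hloop a ha1 hlt]; omega)
      · subst heq; exact List.count_pos_iff.mp (by rw [hcn]; omega)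
    have hplen : (PySem.List.pyRange 1 ((xs.length : Int) - 1 + 1) 1).length
        = (PySem.Set.ofList xs).length := by
      rw [PySem.List.length_pyRange_one]; omega
    have hperm : (PySem.List.pyRange 1 ((xs.length : Int) - 1 + 1) 1).Perm (PySem.Set.ofList xs) :=
      (List.subperm_of_subset (PySem.List.nodup_pyRange_one _ _) hsub).perm_of_length_le
        (le_of_eq hplen.symm)
    have hmem : ∀ a : Int, a ∈ xs ↔ (1 ≤ a ∧ a ≤ (xs.length : Int) - 1) := by
      intro a
      rw [← PySem.Set.mem_ofList, ← hperm.mem_iff, PySem.List.mem_pyRange_one]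
      omega
    have hcount : ∀ a : Int, List.count a xs =
        List.count a (PySem.List.pyRange 1 ((xs.length : Int) - 1) 1
          ++ [(xs.length : Int) - 1, (xs.length : Int) - 1]) := by
      intro a
      rw [count_target]
      by_cases hn' : a = (xs.length : Int) - 1
      · subst hn'
        rw [hcn]
        simp
      · by_cases hr : 1 ≤ a ∧ a < (xs.length : Int) - 1
        · rw [hloop a hr.1 hr.2, if_pos hr, if_neg hn']
        · rw [if_neg hr, if_neg hn']
          exact List.count_eq_zero_of_not_mem (fun hm => by
            have := (hmem a).mp hm
            omega)
    refine ⟨hn1, ?_⟩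
    exact PySem.List.sorted_id_eq_of_perm_of_pairwise _ _
      (List.perm_iff_count.mpr hcount).symm
      (by
        rw [List.pairwise_append]
        refine ⟨(PySem.List.pairwise_lt_pyRange_one 1 _).imp (fun h => le_of_lt h), ?_, ?_⟩
        · simp
        · intro a ha b hb
          obtain ⟨-, ha2⟩ := PySem.List.mem_pyRange_one.mp ha
          have hb' : b = (xs.length : Int) - 1 := by
            rcases List.mem_cons.mp hb with h | h
            · exact h
            · simpa using h
          omega)
  · rintro ⟨hn1, hs⟩
    have hperm2 : xs.Perm (PySem.List.pyRange 1 ((xs.length : Int) - 1) 1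
        ++ [(xs.length : Int) - 1, (xs.length : Int) - 1]) := by
      have h := (PySem.List.sorted_perm xs (fun x => x) false).symm
      rw [hs] at h
      exact h
    have hcount := List.perm_iff_count.mp hperm2
    refine ⟨?_, fun i hi1 hi2 => ?_, ?_⟩
    · -- distinct values of xs are exactly 1..n, so the set has n elements
      have hperm3 : (PySem.Set.ofList xs).Perm
          (PySem.List.pyRange 1 ((xs.length : Int) - 1 + 1) 1) := by
        rw [List.perm_ext_iff_of_nodup (PySem.Set.nodup_ofList xs)
          (PySem.List.nodup_pyRange_one _ _)]
        intro a
        rw [PySem.Set.mem_ofList, hperm2.mem_iff, mem_target _ _ hn1,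
          PySem.List.mem_pyRange_one]
        omega
      have := hperm3.length_eq
      rw [PySem.List.length_pyRange_one] at this
      omega
    · rw [hcount i, count_target, if_pos ⟨hi1, hi2⟩, if_neg (by omega : ¬ i = (xs.length : Int) - 1)]
    · rw [hcount _, count_target, if_neg (by omega : ¬(1 ≤ (xs.length : Int) - 1 ∧ (xs.length : Int) - 1 < (xs.length : Int) - 1)), if_pos rfl]

-- ===== VERDICT (by name: the statement is the Claim_ definition above) =====
theorem is_authentic_collection_spec : Claim_equal_is_authentic_collection := by
  intro xs _
  unfold Spec_is_authentic_collection
  rw [Bool.eq_iff_iff, a_true_iff, alt_true_iff]
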